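-- pv_equiv track=rewrite | github.com/ValseLee/algorithm_study | 프로그래머스/unrated/181932. 코드 처리하기/코드 처리하기.py | solution
-- ===== SOURCE A (Python) =====
-- def solution(code):
--     # 글자수만큼 반복
--     ret = ""
--     mode = 0
--     for i in range(len(code)):
--         if mode == 0 and code[i] != '1' and i % 2 == 0:
--             ret += code[i]
--         elif mode == 0 and code[i] == '1':
--             mode = 1
--         elif mode == 1 and code[i] != '1' and i % 2 != 0:
--             ret += code[i]
--         elif mode == 1 and code[i] == '1':
--             mode = 0
--
--     return ret if ret != "" else 'EMPTY'
-- ===== SOURCE B (Python) =====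
-- def solution(code):
--     # Pass 1: prefix[i] = number of '1' characters in code[:i].
--     prefix = [0]
--     for ch in code:
--         prefix.append(prefix[-1] + (ch == '1'))
--     # Pass 2: select characters whose index parity matches the parity of ones seen before them.
--     picked = [ch for i, (ch, p) in enumerate(zip(code, prefix)) if ch != '1' and i % 2 == p % 2]
--     return ''.join(picked) if picked else 'EMPTY'
-- ===== Notes on version B (the rewrite author's own statement) =====
-- stated objective: alternative
-- what changed: Replaces the inline mode-toggling state machine with a precomputed prefix count of '1's followed by a stateless selection pass (keep code[i] iff i % 2 == ones-before-i % 2).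
import Mathlib
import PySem

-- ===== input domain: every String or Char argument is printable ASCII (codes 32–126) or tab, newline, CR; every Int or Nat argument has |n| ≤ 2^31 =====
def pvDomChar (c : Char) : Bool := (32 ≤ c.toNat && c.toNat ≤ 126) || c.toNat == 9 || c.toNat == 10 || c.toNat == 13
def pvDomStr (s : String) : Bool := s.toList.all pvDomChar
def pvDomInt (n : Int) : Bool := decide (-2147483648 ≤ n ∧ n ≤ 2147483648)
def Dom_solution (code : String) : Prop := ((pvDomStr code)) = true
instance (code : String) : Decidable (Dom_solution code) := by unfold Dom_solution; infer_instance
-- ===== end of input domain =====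

-- B replaces A's inline mode-toggling state machine by a precomputed prefix count of '1's
-- plus a stateless selection pass (objective: alternative decomposition, same result).


-- ===== PORT A =====
-- one iteration of A's loop body: state = (ret, mode), input = (code[i], i)
def solutionStep (st : List Char × Nat) (ci : Char × Nat) : List Char × Nat :=
  if st.2 = 0 ∧ ci.1 ≠ '1' ∧ ci.2 % 2 = 0 then (st.1 ++ [ci.1], st.2)
  else if st.2 = 0 ∧ ci.1 = '1' then (st.1, 1)
  else if st.2 = 1 ∧ ci.1 ≠ '1' ∧ ci.2 % 2 ≠ 0 then (st.1 ++ [ci.1], st.2)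
  else if st.2 = 1 ∧ ci.1 = '1' then (st.1, 0)
  else st

def solution (code : String) : String :=
  let st := (code.toList.zipIdx).foldl solutionStep ([], 0)
  if st.1 ≠ [] then String.mk st.1 else "EMPTY"

-- ===== PORT B =====
def solution_alt (code : String) : String :=
  let cs := code.toList
  -- pass 1: prefix counts of '1's (prefix[i] = ones in code[:i])
  let pre := cs.scanl (fun a c => a + (if c = '1' then 1 else 0)) 0
  -- pass 2: stateless selection
  let picked := ((cs.zip pre).zipIdx).filterMap
    (fun x => if x.1.1 ≠ '1' ∧ x.2 % 2 = x.1.2 % 2 then some x.1.1 else none)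
  if picked ≠ [] then String.mk picked else "EMPTY"

-- ===== PRECONDITION & SPEC =====
def Spec_solution (code : String) (out : String) : Prop := out = solution_alt code
instance (code : String) (out : String) : Decidable (Spec_solution code out) := by unfold Spec_solution; infer_instance

-- ===== CLAIM (what is proved, stated in full; the proofs are below) =====
def Claim_equal_solution : Prop := ∀ (code : String), Dom_solution code → Spec_solution code (solution code)

-- ===== LEMMAS AND PROOFS =====

-- common reference: the characters kept, scanning cs from index i in mode m
def sel : List Char → Nat → Nat → List Char
  | [], _, _ => []
  | c :: cs, i, m =>
      if c = '1' then sel cs (i+1) (1-m)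
      else (if i % 2 = m then [c] else []) ++ sel cs (i+1) m

theorem foldl_step_eq_sel (cs : List Char) :
    ∀ (i : Nat) (ret : List Char) (m : Nat), m ≤ 1 →
      ((cs.zipIdx i).foldl solutionStep (ret, m)).1 = ret ++ sel cs i m := by
  induction cs with
  | nil => intro i ret m _; simp [sel]
  | cons c cs ih =>
    intro i ret m hm
    rw [List.zipIdx_cons, List.foldl_cons]
    interval_cases m
    · by_cases h1 : c = '1'
      · simp [solutionStep, h1, sel, ih (i+1) ret 1 (by omega)]
      · by_cases h2 : i % 2 = 0
        · simp [solutionStep, h1, h2, sel, ih (i+1) (ret ++ [c]) 0 (by omega)]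
        · simp [solutionStep, h1, h2, sel, ih (i+1) ret 0 (by omega)]
    · by_cases h1 : c = '1'
      · simp [solutionStep, h1, sel, ih (i+1) ret 0 (by omega)]
      · by_cases h2 : i % 2 = 0
        · simp [solutionStep, h1, h2, sel, ih (i+1) ret 1 (by omega)]
        · have h2' : i % 2 = 1 := by omega
          simp [solutionStep, h1, h2', sel, ih (i+1) (ret ++ [c]) 1 (by omega)]

theorem filterMap_zip_scanl_eq_sel (cs : List Char) :
    ∀ (a i : Nat),
      (((cs.zip (cs.scanl (fun a c => a + (if c = '1' then 1 else 0)) a)).zipIdx i).filterMap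
        (fun x => if x.1.1 ≠ '1' ∧ x.2 % 2 = x.1.2 % 2 then some x.1.1 else none))
      = sel cs i (a % 2) := by
  induction cs with
  | nil => intro a i; simp [sel]
  | cons c cs ih =>
    intro a i
    rw [List.scanl_cons, List.zip_cons_cons, List.zipIdx_cons, List.filterMap_cons]
    by_cases h1 : c = '1'
    · have : (a + 1) % 2 = 1 - a % 2 := by omega
      simp [h1, sel, ih (a + 1) (i + 1), this]
    · by_cases h2 : i % 2 = a % 2
      · simp [h1, h2, sel, ih a (i + 1)]
      · simp [h1, h2, sel, ih a (i + 1)]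

-- ===== VERDICT (by name: the statement is the Claim_ definition above) =====
theorem solution_spec : Claim_equal_solution := by
  intro code _
  unfold Spec_solution
  dsimp only [solution, solution_alt]
  rw [foldl_step_eq_sel code.toList 0 [] 0 (by omega),
      filterMap_zip_scanl_eq_sel code.toList 0 0]
  simp
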